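-- pv_equiv track=rewrite | github.com/hougantc-nvda/IsaacTeleop | src/postprocessing/egocentric_hand_reconstruction/quality_control/detect_jumpy_hand_from_world_results.py | _jump_interpolate_mask
-- ===== SOURCE A (Python) =====
-- from typing import Dict, List, Optional, Tuple
--
-- def _jump_interpolate_mask(mask: List[bool], window: int = 10) -> List[bool]:
--     """
--     For a jump mask (true=normal, false=jump): if frame t is a jump and any of the
--     following `window` frames is also a jump at t', set all frames from t to t'
--     (inclusive) to false in the result. Fills short gaps between nearby jumps.
--     """
--     T = len(mask)
--     out = list(mask)
--     for t in range(T):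
--         if mask[t]:
--             continue
--         for k in range(1, min(window + 1, T - t)):
--             if not mask[t + k]:
--                 for i in range(t, t + k + 1):
--                     out[i] = False
--                 break
--     return out
-- ===== SOURCE B (Python) =====
-- def _jump_interpolate_mask(mask, window=10):
--     """Fill short gaps between nearby jumps: precompute the jump indices once and
--     fill between consecutive jump pairs at distance <= window (O(T) vs A's O(T*window))."""
--     out = list(mask)
--     jumps = [i for i in range(len(mask)) if not mask[i]]
--     for a, b in zip(jumps, jumps[1:]):
--         if b - a <= window:
--             for i in range(a, b + 1):
--                 out[i] = False
--     return out
-- ===== Notes on version B (the rewrite author's own statement) =====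
-- stated objective: alternative
-- what changed: B precomputes the list of jump indices once and fills between consecutive jump pairs at distance <= window in a single pass, instead of A's per-frame scan of the next `window` frames.
import Mathlib
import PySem

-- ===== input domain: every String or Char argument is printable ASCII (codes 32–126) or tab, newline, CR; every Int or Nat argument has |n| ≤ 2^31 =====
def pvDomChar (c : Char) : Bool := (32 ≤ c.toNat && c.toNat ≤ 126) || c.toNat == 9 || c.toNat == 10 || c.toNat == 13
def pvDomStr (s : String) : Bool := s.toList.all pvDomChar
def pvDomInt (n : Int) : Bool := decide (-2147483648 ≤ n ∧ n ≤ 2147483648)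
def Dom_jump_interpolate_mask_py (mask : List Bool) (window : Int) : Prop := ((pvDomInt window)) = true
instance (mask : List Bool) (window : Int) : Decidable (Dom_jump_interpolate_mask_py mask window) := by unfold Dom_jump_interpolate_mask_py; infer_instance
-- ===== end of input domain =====

-- B replaces A's per-frame scan of the next `window` frames by one precomputed list
-- of jump indices, zipped with itself to give consecutive jump pairs, filling between
-- pairs at distance ≤ window: a single-pass alternative with the same output.

-- ===== PORT A =====
-- `for i in range(a, a+len): out[i] = False` (the common inner fill loop of both
-- Pythons; indices are always in range, so `List.set` is exact)
def fillFalse (out : List Bool) (a len : Nat) : List Bool :=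
  (List.range' a len).foldl (fun o i => o.set i false) out

-- `for k in ks: if not mask[t+k]: <fill t..t+k>; break` (indices in range on every call)
def aInner (mask : List Bool) (t : Nat) (out : List Bool) : List Nat → List Bool
  | [] => out
  | k :: rest =>
    if mask.getD (t + k) true = false then fillFalse out t (k + 1)
    else aInner mask t out rest

-- literal port of A: outer loop over t ∈ range(T); `mask[t]` is in range, ported as getD
def jump_interpolate_mask_py (mask : List Bool) (window : Int) : List Bool :=
  (List.range mask.length).foldl
    (fun out t =>
      if mask.getD t true then out
      else aInner mask t out
        (List.range' 1 (min (window + 1) ((mask.length : Int) - t) - 1).toNat))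
    mask

-- ===== PORT B =====
-- literal port of B: jump indices computed once, then one pass over consecutive pairs
def jump_interpolate_mask_py_alt (mask : List Bool) (window : Int) : List Bool :=
  let jumps := (List.range mask.length).filter (fun i => mask.getD i true = false)
  (jumps.zip jumps.tail).foldl
    (fun out ab =>
      if (ab.2 : Int) - (ab.1 : Int) ≤ window then fillFalse out ab.1 (ab.2 + 1 - ab.1)
      else out)
    mask

-- ===== PRECONDITION & SPEC =====
def Spec_jump_interpolate_mask_py (mask : List Bool) (window : Int) (out : List Bool) : Prop := out = jump_interpolate_mask_py_alt mask window
instance (mask : List Bool) (window : Int) (out : List Bool) : Decidable (Spec_jump_interpolate_mask_py mask window out) := by unfold Spec_jump_interpolate_mask_py; infer_instance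

-- ===== CLAIM (what is proved, stated in full; the proofs are below) =====
def Claim_equal_jump_interpolate_mask_py : Prop := ∀ (mask : List Bool) (window : Int), Dom_jump_interpolate_mask_py mask window → Spec_jump_interpolate_mask_py mask window (jump_interpolate_mask_py mask window)

-- ===== LEMMAS AND PROOFS =====

-- jumps of `mask` at indices ≥ a (proof-side view of B's jump list)
def jFrom (mask : List Bool) (a : Nat) : List Nat :=
  (List.range' a (mask.length - a)).filter (fun i => mask.getD i true = false)

-- B's fold step
def bStep (window : Int) (out : List Bool) (ab : Nat × Nat) : List Bool :=
  if (ab.2 : Int) - (ab.1 : Int) ≤ window then fillFalse out ab.1 (ab.2 + 1 - ab.1)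
  else out

def pairFold (window : Int) (js : List Nat) (out : List Bool) : List Bool :=
  (js.zip js.tail).foldl (bStep window) out

lemma jFrom_ge (mask : List Bool) (a : Nat) (h : mask.length ≤ a) : jFrom mask a = [] := by
  unfold jFrom
  rw [Nat.sub_eq_zero_of_le h]
  rfl

lemma jFrom_unfold (mask : List Bool) (a : Nat) (h : a < mask.length) :
    jFrom mask a =
      if mask.getD a true = false then a :: jFrom mask (a + 1) else jFrom mask (a + 1) := by
  unfold jFrom
  have h1 : mask.length - a = (mask.length - (a + 1)) + 1 := by omega
  by_cases hb : mask.getD a true = false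
  · rw [h1, List.range'_succ, List.filter_cons, if_pos (by simpa using hb), if_pos hb]
  · rw [h1, List.range'_succ, List.filter_cons, if_neg (by simpa using hb), if_neg hb]

lemma jFrom_empty_no_jump (mask : List Bool) (a : Nat) (h : jFrom mask a = [])
    (j : Nat) (hj1 : a ≤ j) (hj2 : j < mask.length) : ¬ (mask.getD j true = false) := by
  intro hfalse
  have hmem : j ∈ jFrom mask a := by
    unfold jFrom
    rw [List.mem_filter]
    constructor
    · rw [List.mem_range'_1]; omega
    · simpa using hfalse
  rw [h] at hmem
  exact absurd hmem (List.not_mem_nil)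

lemma jFrom_head_min : ∀ (k : Nat) (mask : List Bool) (a n : Nat) (rest : List Nat),
    mask.length - a = k → jFrom mask a = n :: rest →
    a ≤ n ∧ n < mask.length ∧ mask.getD n true = false ∧
      (∀ j, a ≤ j → j < n → ¬ (mask.getD j true = false)) := by
  intro k
  induction k with
  | zero =>
    intro mask a n rest hk hJ
    rw [jFrom_ge mask a (by omega)] at hJ
    exact absurd hJ (by simp)
  | succ k ih =>
    intro mask a n rest hk hJ
    have ha : a < mask.length := by omega
    rw [jFrom_unfold mask a ha] at hJ
    by_cases hb : mask.getD a true = false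
    · rw [if_pos hb] at hJ
      injection hJ with h1 h2
      subst h1
      exact ⟨le_rfl, ha, hb, fun j hj1 hj2 => absurd hj2 (by omega)⟩
    · rw [if_neg hb] at hJ
      obtain ⟨h1, h2, h3, h4⟩ := ih mask (a + 1) n rest (by omega) hJ
      refine ⟨by omega, h2, h3, ?_⟩
      intro j hj1 hj2
      by_cases hja : j = a
      · subst hja; exact hb
      · exact h4 j (by omega) hj2

lemma aInner_cons (mask : List Bool) (t : Nat) (out : List Bool) (k : Nat) (rest : List Nat) :
    aInner mask t out (k :: rest) =
      if mask.getD (t + k) true = false then fillFalse out t (k + 1)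
      else aInner mask t out rest := rfl

-- aInner finds the first qualifying k
lemma aInner_first : ∀ (M : Nat) (c : Nat) (mask : List Bool) (t d : Nat) (out : List Bool),
    (∀ kk, c ≤ kk → kk < d → ¬ (mask.getD (t + kk) true = false)) →
    mask.getD (t + d) true = false → c ≤ d →
    aInner mask t out (List.range' c M) =
      if d < c + M then fillFalse out t (d + 1) else out := by
  intro M
  induction M with
  | zero =>
    intro c mask t d out _ _ hcd
    simp only [List.range'_zero, aInner]
    rw [if_neg (by omega)]
  | succ M ih =>
    intro c mask t d out hfirst hd hcd
    rw [List.range'_succ]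
    by_cases hc : mask.getD (t + c) true = false
    · have hceq : c = d := by
        by_contra hne
        exact hfirst c le_rfl (by omega) hc
      subst hceq
      rw [aInner_cons, if_pos hc, if_pos (by omega)]
    · have hcd' : c < d := by
        rcases Nat.lt_or_ge c d with h | h
        · exact h
        · have : c = d := by omega
          subst this; exact absurd hd hc
      rw [aInner_cons, if_neg hc, ih (c+1) mask t d out (fun kk h1 h2 => hfirst kk (by omega) h2) hd (by omega),
        show c + 1 + M = c + (M + 1) from by omega]

lemma aInner_none : ∀ (ks : List Nat) (mask : List Bool) (t : Nat) (out : List Bool),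
    (∀ k ∈ ks, ¬ (mask.getD (t + k) true = false)) →
    aInner mask t out ks = out := by
  intro ks
  induction ks with
  | nil => intro mask t out _; rfl
  | cons k rest ih =>
    intro mask t out h
    have hk := h k (by simp)
    simp only [aInner]
    rw [if_neg hk]
    exact ih mask t out (fun k' hk' => h k' (by simp [hk']))

-- A's inner loop when there is no jump after s
lemma stepA_eq_nil (mask : List Bool) (window : Int) (s : Nat) (out : List Bool)
    (hJ : jFrom mask (s + 1) = []) :
    aInner mask s out (List.range' 1 (min (window + 1) ((mask.length : Int) - s) - 1).toNat) = out := by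
  apply aInner_none
  intro k hk
  rw [List.mem_range'_1] at hk
  by_cases hlt : s + k < mask.length
  · exact jFrom_empty_no_jump mask (s + 1) hJ (s + k) (by omega) hlt
  · rw [List.getD_eq_default _ _ (by omega)]
    simp

-- A's inner loop when the first jump after s is n: it equals B's step on the pair (s, n)
lemma stepA_eq_cons (mask : List Bool) (window : Int) (s : Nat) (out : List Bool)
    (n : Nat) (r : List Nat) (hJ : jFrom mask (s + 1) = n :: r) :
    aInner mask s out (List.range' 1 (min (window + 1) ((mask.length : Int) - s) - 1).toNat) =
      bStep window out (s, n) := by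
  obtain ⟨h1, h2, h3, h4⟩ := jFrom_head_min (mask.length - (s + 1)) mask (s + 1) n r rfl hJ
  have hd1 : 1 ≤ n - s := by omega
  rw [aInner_first _ 1 mask s (n - s) out
      (fun kk hk1 hk2 => h4 (s + kk) (by omega) (by omega))
      (by rw [show s + (n - s) = n from by omega]; exact h3) hd1]
  unfold bStep
  by_cases hw : (n : Int) - (s : Int) ≤ window
  · rw [if_pos (by omega), if_pos hw, show n - s + 1 = n + 1 - s from by omega]
  · rw [if_neg (by omega), if_neg hw]

lemma main_fold : ∀ (k : Nat) (mask : List Bool) (window : Int) (s : Nat) (out : List Bool),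
    s + k = mask.length →
    (List.range' s k).foldl
      (fun out t =>
        if mask.getD t true then out
        else aInner mask t out
          (List.range' 1 (min (window + 1) ((mask.length : Int) - t) - 1).toNat)) out
      = pairFold window (jFrom mask s) out := by
  intro k
  induction k with
  | zero =>
    intro mask window s out hk
    rw [jFrom_ge mask s (by omega)]
    rfl
  | succ k ih =>
    intro mask window s out hk
    have hs : s < mask.length := by omega
    rw [List.range'_succ, List.foldl_cons]
    by_cases hb : mask.getD s true = false
    · rw [jFrom_unfold mask s hs, if_pos hb]
      cases hJ : jFrom mask (s + 1) with
      | nil =>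
        rw [if_neg (by rw [hb]; decide), stepA_eq_nil mask window s out hJ,
            ih mask window (s + 1) out (by omega), hJ]
        rfl
      | cons n r =>
        rw [if_neg (by rw [hb]; decide), stepA_eq_cons mask window s out n r hJ,
            ih mask window (s + 1) (bStep window out (s, n)) (by omega), hJ]
        rfl
    · have hb' : mask.getD s true = true := by
        cases h : mask.getD s true
        · exact absurd h hb
        · rfl
      rw [if_pos hb']
      rw [jFrom_unfold mask s hs, if_neg hb]
      exact ih mask window (s+1) out (by omega)

-- ===== VERDICT (by name: the statement is the Claim_ definition above) =====
theorem jump_interpolate_mask_py_spec : Claim_equal_jump_interpolate_mask_py := by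
  intro mask window _
  unfold Spec_jump_interpolate_mask_py jump_interpolate_mask_py
  rw [List.range_eq_range']
  rw [main_fold mask.length mask window 0 mask (by omega)]
  unfold jump_interpolate_mask_py_alt
  rw [List.range_eq_range']
  rfl
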